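-- pv_equiv track=rewrite | github.com/DonQueso89/aoc | 2018/day21.py | next_exit_value
-- ===== SOURCE A (Python) =====
-- def next_exit_value(r):
--     x = 8595037
--     x += (r & 255)
--     x &= 16777215
--     x *= 65899
--     x &= 16777215
--     while 256 <= r:
--         r //= 256
--         x += (r & 255)
--         x &= 16777215
--         x *= 65899
--         x &= 16777215
--     return x
-- ===== SOURCE B (Python) =====
-- def next_exit_value(r):
--     # Recursively reduce r's base-256 digits (high to low) to an affine map
--     # x -> (w*x + s) % M, then apply it once to the seed 8595037.
--     M, m = 16777216, 65899
--
--     def weigh(r):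
--         # (s, w) such that hashing a state x over the digits of r gives (w*x + s) % M
--         d = r & 255
--         if r < 256:
--             return m * d % M, m % M
--         s, w = weigh(r // 256)
--         w = m * w % M
--         return (w * d + s) % M, w
--
--     s, w = weigh(r)
--     return (w * 8595037 + s) % M
-- ===== Notes on version B (the rewrite author's own statement) =====
-- stated objective: alternative
-- what changed: Instead of iterating the masked hash step over a running state, B recursively composes the per-digit updates into a single affine map x -> (w*x + s) modulo the 24-bit mask (using % arithmetic, no bit masks in the reduction) and applies it once to the seed.
import Mathlib
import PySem

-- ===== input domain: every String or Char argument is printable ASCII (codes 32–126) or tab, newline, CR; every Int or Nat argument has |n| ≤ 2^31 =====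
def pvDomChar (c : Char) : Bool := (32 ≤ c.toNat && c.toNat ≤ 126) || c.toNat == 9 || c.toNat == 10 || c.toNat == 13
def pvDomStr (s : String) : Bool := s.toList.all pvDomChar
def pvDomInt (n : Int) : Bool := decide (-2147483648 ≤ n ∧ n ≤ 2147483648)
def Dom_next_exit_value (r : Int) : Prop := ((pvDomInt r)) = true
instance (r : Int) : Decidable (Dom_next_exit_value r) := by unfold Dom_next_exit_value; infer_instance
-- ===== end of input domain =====

-- B replaces A's stateful masked-hash loop by recursively composing the per-digit
-- updates into one affine map x -> (w*x + s) modulo the 24-bit modulus, applied once to the seed;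
-- same cost, alternative algorithmic shape.

-- termination helper shared by both ports: r // 256 shrinks (in toNat) while 256 ≤ r
theorem pvFloordiv256_toNat_lt (r : Int) (h : 256 ≤ r) :
    (PySem.Int.floordiv r 256).toNat < r.toNat := by
  have he : PySem.Int.floordiv r 256 = r / 256 :=
    PySem.Int.floordiv_eq_ediv_of_pos (by omega)
  have hq := Int.mul_ediv_add_emod r 256
  have h2 := Int.emod_nonneg r (by norm_num : (256:Int) ≠ 0)
  have h3 := Int.emod_lt_of_pos r (by norm_num : (0:Int) < 256)
  omega

-- ===== PORT A =====
-- A's hash step: x += (r & 255); x &= 16777215; x *= 65899; x &= 16777215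
def pvStep (x d : Int) : Int :=
  PySem.Int.band (PySem.Int.band (x + d) 16777215 * 65899) 16777215

-- A's while loop: while 256 <= r: r //= 256; x = step x (r & 255)
def pvLoopA (r x : Int) : Int :=
  if h : 256 ≤ r then
    pvLoopA (PySem.Int.floordiv r 256)
      (pvStep x (PySem.Int.band (PySem.Int.floordiv r 256) 255))
  else x
termination_by r.toNat
decreasing_by exact pvFloordiv256_toNat_lt r h

def next_exit_value (r : Int) : Int :=
  pvLoopA r (pvStep 8595037 (PySem.Int.band r 255))

-- ===== PORT B =====
-- Source B's weigh: (s, w) with the hash over r's digits from state x = (w*x + s) mod the 24-bit modulus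
def pvWeigh (r : Int) : Int × Int :=
  if _h : r < 256 then
    (PySem.Int.mod (65899 * PySem.Int.band r 255) 16777216,
     PySem.Int.mod 65899 16777216)
  else
    (PySem.Int.mod
       (PySem.Int.mod (65899 * (pvWeigh (PySem.Int.floordiv r 256)).2) 16777216
          * PySem.Int.band r 255
        + (pvWeigh (PySem.Int.floordiv r 256)).1) 16777216,
     PySem.Int.mod (65899 * (pvWeigh (PySem.Int.floordiv r 256)).2) 16777216)
termination_by r.toNat
decreasing_by exact pvFloordiv256_toNat_lt r (by omega)

def next_exit_value_alt (r : Int) : Int :=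
  PySem.Int.mod ((pvWeigh r).2 * 8595037 + (pvWeigh r).1) 16777216

-- ===== PRECONDITION & SPEC =====
def Spec_next_exit_value (r : Int) (out : Int) : Prop := out = next_exit_value_alt r
instance (r : Int) (out : Int) : Decidable (Spec_next_exit_value r out) := by unfold Spec_next_exit_value; infer_instance

-- ===== CLAIM (what is proved, stated in full; the proofs are below) =====
def Claim_equal_next_exit_value : Prop := ∀ (r : Int), Dom_next_exit_value r → Spec_next_exit_value r (next_exit_value r)

-- ===== LEMMAS AND PROOFS =====

-- masking with 2^k - 1 is emod 2^k
theorem pv_band255 (a : Int) : PySem.Int.band a 255 = a % 256 := by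
  unfold PySem.Int.band
  by_cases h : 0 ≤ a
  · rw [if_pos h, if_pos (by norm_num : (0:Int) ≤ 255)]
    have hb := Nat.and_two_pow_sub_one_eq_mod a.toNat 8
    norm_num at hb
    simp only [show ((255:Int)).toNat = 255 from rfl, hb]
    omega
  · rw [if_neg h, if_pos (by norm_num : (0:Int) ≤ 255)]
    have hb := Nat.and_two_pow_sub_one_eq_mod (-a - 1).toNat 8
    simp only [show (2 ^ 8 - 1 : Nat) = 255 from rfl, show (2 ^ 8 : Nat) = 256 from rfl] at hb
    simp only [show ((255:Int)).toNat = 255 from rfl, Nat.and_comm 255, hb]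
    omega

theorem pv_bandM (a : Int) (ha : 0 ≤ a) :
    PySem.Int.band a 16777215 = a % 16777216 := by
  rw [PySem.Int.band_of_nonneg ha (by norm_num)]
  have hb := Nat.and_two_pow_sub_one_eq_mod a.toNat 24
  norm_num at hb
  simp only [show ((16777215:Int)).toNat = 16777215 from rfl, hb]
  omega

-- A's step is multiplication by 65899 mod 2^24
theorem pvStep_eq (x d : Int) (hx : 0 ≤ x) (hd : 0 ≤ d) :
    pvStep x d = 65899 * (x + d) % 16777216 := by
  unfold pvStep
  rw [pv_bandM (x + d) (by omega)]
  rw [pv_bandM _ (mul_nonneg (Int.emod_nonneg _ (by norm_num)) (by norm_num))]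
  conv_rhs => rw [show (65899 : Int) * (x + d) = (x + d) * 65899 by ring, Int.mul_emod,
    show (65899 : Int) % 16777216 = 65899 by norm_num]

theorem pv_hmod (a : Int) : Int.ModEq 16777216 (a % 16777216) a :=
  Int.emod_emod_of_dvd a dvd_rfl

-- base case: r < 256 (one digit)
theorem pvLoopA_affine_base (r x : Int) (hr : r < 256) (hx : 0 ≤ x) :
    pvLoopA r (pvStep x (PySem.Int.band r 255))
      = ((pvWeigh r).2 * x + (pvWeigh r).1) % 16777216 := by
  rw [pvLoopA, dif_neg (by omega : ¬ 256 ≤ r), pvWeigh, dif_pos hr]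
  have hd : 0 ≤ PySem.Int.band r 255 := by
    rw [pv_band255]; exact Int.emod_nonneg r (by norm_num)
  rw [pvStep_eq x _ hx hd]
  simp only [PySem.Int.mod_eq_emod_of_pos (by norm_num : (0:Int) < 16777216)]
  have : Int.ModEq 16777216
      (65899 % 16777216 * x + 65899 * PySem.Int.band r 255 % 16777216)
      (65899 * (x + PySem.Int.band r 255)) := by
    calc 65899 % 16777216 * x + 65899 * PySem.Int.band r 255 % 16777216
        ≡ 65899 * x + 65899 * PySem.Int.band r 255 [ZMOD 16777216] :=
          ((pv_hmod 65899).mul_right x).add (pv_hmod (65899 * PySem.Int.band r 255))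
      _ = 65899 * (x + PySem.Int.band r 255) := by ring
  exact this.symm

-- the main invariant: A's peeled loop from state x equals B's affine map applied to x
theorem pvLoopA_affine (n : Nat) : ∀ r x : Int, r.toNat ≤ n → 0 ≤ x →
    pvLoopA r (pvStep x (PySem.Int.band r 255))
      = ((pvWeigh r).2 * x + (pvWeigh r).1) % 16777216 := by
  induction n with
  | zero =>
    intro r x hn hx
    exact pvLoopA_affine_base r x (by omega) hx
  | succ n ih =>
    intro r x hn hx
    by_cases hr : 256 ≤ r
    · have hlt := pvFloordiv256_toNat_lt r hr
      set r' := PySem.Int.floordiv r 256 with hr'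
      have hd : 0 ≤ PySem.Int.band r 255 := by
        rw [pv_band255]; exact Int.emod_nonneg r (by norm_num)
      have hx' : 0 ≤ pvStep x (PySem.Int.band r 255) := by
        rw [pvStep_eq x _ hx hd]; exact Int.emod_nonneg _ (by norm_num)
      rw [pvLoopA, dif_pos hr, ih r' _ (by omega) hx']
      conv_rhs => rw [pvWeigh]
      rw [dif_neg (by omega : ¬ r < 256)]
      simp only [PySem.Int.mod_eq_emod_of_pos (by norm_num : (0:Int) < 16777216)]
      rw [pvStep_eq x _ hx hd]
      set w' := (pvWeigh r').2
      set s' := (pvWeigh r').1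
      set d := PySem.Int.band r 255
      have : Int.ModEq 16777216
          (w' * (65899 * (x + d) % 16777216) + s')
          (65899 * w' % 16777216 * x
            + (65899 * w' % 16777216 * d + s') % 16777216) := by
        calc w' * (65899 * (x + d) % 16777216) + s'
            ≡ w' * (65899 * (x + d)) + s' [ZMOD 16777216] :=
              ((pv_hmod (65899 * (x + d))).mul_left w').add_right s'
          _ = 65899 * w' * x + (65899 * w' * d + s') := by ring
          _ ≡ 65899 * w' % 16777216 * x
              + (65899 * w' % 16777216 * d + s') [ZMOD 16777216] :=
              (((pv_hmod (65899 * w')).symm.mul_right x).add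
                (((pv_hmod (65899 * w')).symm.mul_right d).add_right s'))
          _ ≡ 65899 * w' % 16777216 * x
              + (65899 * w' % 16777216 * d + s') % 16777216 [ZMOD 16777216] :=
              (Int.ModEq.refl _).add (pv_hmod _).symm
      exact this
    · exact pvLoopA_affine_base r x (by omega) hx

-- ===== VERDICT (by name: the statement is the Claim_ definition above) =====
theorem next_exit_value_spec : Claim_equal_next_exit_value := by
  intro r _
  unfold Spec_next_exit_value next_exit_value next_exit_value_alt
  rw [pvLoopA_affine r.toNat r 8595037 le_rfl (by norm_num),
    PySem.Int.mod_eq_emod_of_pos (by norm_num : (0:Int) < 16777216)]
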